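-- pv_equiv track=rewrite | github.com/HYE77/CodingTest | 프로그래머스/0/181926. 수 조작하기 1/수 조작하기 1.py | solution
-- ===== SOURCE A (Python) =====
-- def solution(n, control):
--     for _ in control:
--         if _ == 'w':
--             n += 1
--         elif _ == 's':
--             n -= 1
--         elif _ == 'd':
--             n += 10
--         else:
--             n -= 10
--     return n
-- ===== SOURCE B (Python) =====
-- def solution(n, control):
--     w = control.count('w')
--     s = control.count('s')
--     d = control.count('d')
--     other = len(control) - w - s - d
--     return n + w - s + 10 * d - 10 * other
-- ===== Notes on version B (the rewrite author's own statement) =====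
-- stated objective: simpler
-- what changed: Replaces the branching accumulation loop with three str.count() calls and one closed-form arithmetic expression (the catch-all else count is len(control) minus the three named counts).
import Mathlib
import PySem

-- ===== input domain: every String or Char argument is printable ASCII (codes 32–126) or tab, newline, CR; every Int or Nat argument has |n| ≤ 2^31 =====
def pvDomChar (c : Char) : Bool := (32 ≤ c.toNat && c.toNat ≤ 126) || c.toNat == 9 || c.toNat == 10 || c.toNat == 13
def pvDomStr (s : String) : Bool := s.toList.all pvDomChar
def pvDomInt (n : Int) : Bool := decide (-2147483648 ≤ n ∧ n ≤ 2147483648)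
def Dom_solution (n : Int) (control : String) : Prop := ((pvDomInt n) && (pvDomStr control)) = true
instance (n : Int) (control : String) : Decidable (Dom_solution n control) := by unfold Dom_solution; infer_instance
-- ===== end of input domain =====

-- B replaces A's branching accumulation loop by character counts and one closed-form expression (objective: simpler).

-- ===== PORT A =====
-- for _ in control: branch on the char and accumulate into n
def solution (n : Int) (control : String) : Int :=
  control.toList.foldl
    (fun n c =>
      if c = 'w' then n + 1
      else if c = 's' then n - 1
      else if c = 'd' then n + 10
      else n - 10) n

-- ===== PORT B =====
-- w/s/d = control.count(...); other = len(control) - w - s - d; closed form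
def solution_alt (n : Int) (control : String) : Int :=
  let w : Int := PySem.Str.count control "w"
  let s : Int := PySem.Str.count control "s"
  let d : Int := PySem.Str.count control "d"
  let other : Int := PySem.Str.len control - w - s - d
  n + w - s + 10 * d - 10 * other

-- ===== PRECONDITION & SPEC =====
def Spec_solution (n : Int) (control : String) (out : Int) : Prop := out = solution_alt n control
instance (n : Int) (control : String) (out : Int) : Decidable (Spec_solution n control out) := by unfold Spec_solution; infer_instance

-- ===== CLAIM (what is proved, stated in full; the proofs are below) =====
def Claim_equal_solution : Prop := ∀ (n : Int) (control : String), Dom_solution n control → Spec_solution n control (solution n control)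

-- ===== LEMMAS AND PROOFS =====

-- Chars.count.go for a one-character needle counts occurrences of that character
theorem count_go_singleton (c : Char) (l : List Char) (fuel acc : Nat)
    (h : l.length ≤ fuel) : PySem.Chars.count.go [c] fuel l acc = acc + l.count c := by
  induction l generalizing fuel acc with
  | nil => cases fuel <;> simp [PySem.Chars.count.go]
  | cons x t ih =>
    cases fuel with
    | zero => simp at h
    | succ m =>
      simp only [List.length_cons, Nat.succ_le_succ_iff] at h
      rw [PySem.Chars.count.go]
      by_cases hx : x = c
      · simp [hx, List.isPrefixOf, ih _ _ h]
        omega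
      · have : ¬ ([c].isPrefixOf (x :: t) = true) := by
          simp [List.isPrefixOf]; exact fun hh => hx hh.symm
        simp [this, ih _ _ h, hx]

-- s.count(one-char string) is List.count on the characters
theorem str_count_singleton (s : String) (c : Char) :
    PySem.Str.count s (String.ofList [c]) = s.toList.count c := by
  rw [PySem.Str.count_eq]
  have h1 : (String.ofList [c]).toList = [c] := by simp
  rw [h1, PySem.Chars.count]
  simpa using count_go_singleton c s.toList _ 0 le_rfl

-- the accumulation loop equals the counts closed form
theorem loop_closed_form (l : List Char) (n : Int) :
    l.foldl
      (fun n c =>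
        if c = 'w' then n + 1
        else if c = 's' then n - 1
        else if c = 'd' then n + 10
        else n - 10) n
    = n + l.count 'w' - l.count 's' + 10 * l.count 'd'
        - 10 * ((l.length : Int) - l.count 'w' - l.count 's' - l.count 'd') := by
  induction l generalizing n with
  | nil => simp
  | cons x t ih =>
    simp only [List.foldl_cons, ih, List.count_cons, List.length_cons]
    by_cases hw : x = 'w'
    · simp [hw]; ring
    · by_cases hs : x = 's'
      · simp [hs]; ring
      · by_cases hd : x = 'd'
        · simp [hd]; ring
        · simp [hw, hs, hd]; ring

-- ===== VERDICT (by name: the statement is the Claim_ definition above) =====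
theorem solution_spec : Claim_equal_solution := by
  intro n control _
  unfold Spec_solution solution solution_alt
  have hw := str_count_singleton control 'w'
  have hs := str_count_singleton control 's'
  have hd := str_count_singleton control 'd'
  simp only [show ("w" : String) = String.ofList ['w'] from rfl,
    show ("s" : String) = String.ofList ['s'] from rfl,
    show ("d" : String) = String.ofList ['d'] from rfl, hw, hs, hd,
    PySem.Str.len_eq]
  exact loop_closed_form control.toList n
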